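-- pv_equiv track=rewrite | github.com/ucfcbb/RNAMotifContrast | src/scripts/utils.py | get_aln_mapping
-- ===== SOURCE A (Python) =====
-- def get_aln_mapping(aln_seq1, aln_seq2):
--     """
--     :return ret1: dict[i]->j  i in seq1; j in seq2
--     :return ret2: dict[j]->i  j in seq2; i in seq1
--     """
--     if len(aln_seq1) != len(aln_seq2):
--         return None
--
--     i = j = 0
--
--     ret1 = {}
--     ret2 = {}
--     for k in range(len(aln_seq1)):
--         if aln_seq1[k] == "-" and aln_seq2[k] != "-":
--             j += 1
--         elif aln_seq2[k] == "-" and aln_seq1[k] != "-":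
--             i += 1
--         elif aln_seq1[k] != "-" and aln_seq2[k] != "-":
--             ret1[i] = j
--             ret2[j] = i
--             i += 1
--             j += 1
--
--     return ret1, ret2
-- ===== SOURCE B (Python) =====
-- def get_aln_mapping(aln_seq1, aln_seq2):
--     """
--     :return ret1: dict[i]->j  i in seq1; j in seq2
--     :return ret2: dict[j]->i  j in seq2; i in seq1
--     """
--     if len(aln_seq1) != len(aln_seq2):
--         return None
--
--     def prefix_counts(seq):
--         # acc[k] = number of non-gap characters strictly before position k
--         acc = [0]
--         for c in seq:
--             acc.append(acc[-1] + (c != '-'))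
--         return acc
--
--     idx1 = prefix_counts(aln_seq1)
--     idx2 = prefix_counts(aln_seq2)
--
--     pairs = [(idx1[k], idx2[k])
--              for k in range(len(aln_seq1))
--              if aln_seq1[k] != '-' and aln_seq2[k] != '-']
--
--     return {a: b for a, b in pairs}, {b: a for a, b in pairs}
-- ===== Notes on version B (the rewrite author's own statement) =====
-- stated objective: alternative
-- what changed: Replaces A's single fused loop maintaining two running counters and filling both dicts as it goes by a two-phase decomposition: first build, for each sequence, a prefix table of ungapped indices, then a separate mapping pass reads the tables at every doubly-ungapped column and builds both dicts from the resulting pair list.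
import Mathlib
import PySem

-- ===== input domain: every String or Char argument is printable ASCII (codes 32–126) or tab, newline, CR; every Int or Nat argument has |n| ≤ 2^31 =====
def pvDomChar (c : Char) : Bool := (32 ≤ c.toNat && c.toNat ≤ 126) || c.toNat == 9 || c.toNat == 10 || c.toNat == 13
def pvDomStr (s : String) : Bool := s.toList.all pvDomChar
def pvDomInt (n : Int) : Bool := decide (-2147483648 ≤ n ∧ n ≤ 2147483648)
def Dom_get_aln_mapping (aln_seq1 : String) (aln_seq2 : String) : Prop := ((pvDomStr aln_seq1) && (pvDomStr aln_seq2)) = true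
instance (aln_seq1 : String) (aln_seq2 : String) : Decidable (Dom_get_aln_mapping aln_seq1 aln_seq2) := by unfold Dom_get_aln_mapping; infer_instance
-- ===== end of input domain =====

-- B replaces A's single fused loop (two running counters filling both dicts) by two prefix-count
-- table passes plus a separate mapping pass; same output, objective: alternative decomposition.

-- ===== PORT A =====
def get_aln_mapping (aln_seq1 : String) (aln_seq2 : String) : Option ((List (Int × Int)) × (List (Int × Int))) :=
  if PySem.Str.len aln_seq1 ≠ PySem.Str.len aln_seq2 then none
  else
    let l1 := aln_seq1.toList
    let l2 := aln_seq2.toList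
    -- i = j = 0; ret1 = {}; ret2 = {}; for k in range(len(aln_seq1)): …
    let st := (PySem.List.pyRange 0 (PySem.Str.len aln_seq1) 1).foldl
      (fun (st : Int × Int × PySem.Dict Int Int × PySem.Dict Int Int) k =>
        -- k ∈ range(len): indexing is exact, the default is never read
        let c1 := PySem.List.pyGetD l1 k ' '
        let c2 := PySem.List.pyGetD l2 k ' '
        if c1 = '-' ∧ c2 ≠ '-' then (st.1, st.2.1 + 1, st.2.2.1, st.2.2.2)
        else if c2 = '-' ∧ c1 ≠ '-' then (st.1 + 1, st.2.1, st.2.2.1, st.2.2.2)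
        else if c1 ≠ '-' ∧ c2 ≠ '-' then
          (st.1 + 1, st.2.1 + 1, st.2.2.1.insert st.1 st.2.1, st.2.2.2.insert st.2.1 st.1)
        else st)
      (0, 0, PySem.Dict.empty, PySem.Dict.empty)
    some (st.2.2.1.items, st.2.2.2.items)

-- ===== PORT B =====
-- acc = [0]; for c in seq: acc.append(acc[-1] + (c != '-'))
def pvPrefixCounts (l : List Char) : List Int :=
  l.foldl (fun acc c => acc ++ [PySem.List.pyGetD acc (-1) 0 + (if c ≠ '-' then 1 else 0)]) [0]

def get_aln_mapping_alt (aln_seq1 : String) (aln_seq2 : String) : Option ((List (Int × Int)) × (List (Int × Int))) :=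
  if PySem.Str.len aln_seq1 ≠ PySem.Str.len aln_seq2 then none
  else
    let l1 := aln_seq1.toList
    let l2 := aln_seq2.toList
    let idx1 := pvPrefixCounts l1
    let idx2 := pvPrefixCounts l2
    -- pairs = [(idx1[k], idx2[k]) for k in range(len(aln_seq1)) if … ]
    let pairs := (PySem.List.pyRange 0 (PySem.Str.len aln_seq1) 1).filterMap
      (fun k =>
        if PySem.List.pyGetD l1 k ' ' ≠ '-' ∧ PySem.List.pyGetD l2 k ' ' ≠ '-' then
          some (PySem.List.pyGetD idx1 k 0, PySem.List.pyGetD idx2 k 0)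
        else none)
    some ((pairs.foldl (fun d p => d.insert p.1 p.2) (PySem.Dict.empty : PySem.Dict Int Int)).items,
          (pairs.foldl (fun d p => d.insert p.2 p.1) (PySem.Dict.empty : PySem.Dict Int Int)).items)

-- ===== PRECONDITION & SPEC =====
def Spec_get_aln_mapping (aln_seq1 : String) (aln_seq2 : String) (out : Option ((List (Int × Int)) × (List (Int × Int)))) : Prop := out = get_aln_mapping_alt aln_seq1 aln_seq2
instance (aln_seq1 : String) (aln_seq2 : String) (out : Option ((List (Int × Int)) × (List (Int × Int)))) : Decidable (Spec_get_aln_mapping aln_seq1 aln_seq2 out) := by unfold Spec_get_aln_mapping; infer_instance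

-- ===== CLAIM (what is proved, stated in full; the proofs are below) =====
def Claim_equal_get_aln_mapping : Prop := ∀ (aln_seq1 : String) (aln_seq2 : String), Dom_get_aln_mapping aln_seq1 aln_seq2 → Spec_get_aln_mapping aln_seq1 aln_seq2 (get_aln_mapping aln_seq1 aln_seq2)

-- ===== LEMMAS AND PROOFS =====

-- 1 for a non-gap character, 0 for '-'
def pvDelta (c : Char) : Int := if c ≠ '-' then 1 else 0

-- canonical list of (ungapped index in seq1, ungapped index in seq2) over the zipped columns
def pvPairs : List (Char × Char) → Int → Int → List (Int × Int)
  | [], _, _ => []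
  | p :: t, i, j =>
    if p.1 ≠ '-' ∧ p.2 ≠ '-' then (i, j) :: pvPairs t (i + 1) (j + 1)
    else pvPairs t (i + pvDelta p.1) (j + pvDelta p.2)

-- number of non-gap characters strictly before position k
def pvCnt (l : List Char) (k : Nat) : Int := ((l.take k).countP (fun c => c != '-') : Int)

theorem pvCnt_zero (l : List Char) : pvCnt l 0 = 0 := by simp [pvCnt]

theorem pvCnt_cons_succ (a : Char) (t : List Char) (k : Nat) :
    pvCnt (a :: t) (k + 1) = pvDelta a + pvCnt t k := by
  simp only [pvCnt, pvDelta, List.take_succ_cons, List.countP_cons]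
  split
  · simp_all
    omega
  · simp_all

theorem pvPrefixCounts_eq (l : List Char) :
    pvPrefixCounts l = (List.range (l.length + 1)).map (fun k => pvCnt l k) := by
  induction l using List.reverseRecOn with
  | nil => simp [pvPrefixCounts, pvCnt]
  | append_singleton t c ih =>
    have hstep : pvPrefixCounts (t ++ [c])
        = pvPrefixCounts t ++ [PySem.List.pyGetD (pvPrefixCounts t) (-1) 0 + (if c ≠ '-' then 1 else 0)] := by
      simp [pvPrefixCounts, List.foldl_append]
    have hlast : PySem.List.pyGetD ((List.range (t.length + 1)).map (fun k => pvCnt t k)) (-1) 0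
        = pvCnt t t.length := by
      rw [List.range_succ, List.map_append]
      exact PySem.List.pyGetD_neg_one_append_singleton _ _ _
    have hr : (List.range ((t ++ [c]).length + 1)).map (fun k => pvCnt (t ++ [c]) k)
        = (List.range (t.length + 1)).map (fun k => pvCnt t k)
          ++ [pvCnt t t.length + (if c ≠ '-' then 1 else 0)] := by
      have hlen : (t ++ [c]).length + 1 = (t.length + 1) + 1 := by simp
      rw [hlen, List.range_succ, List.map_append]
      congr 1
      · apply List.map_congr_left
        intro k hk
        have hk' : k ≤ t.length := by simpa [Nat.lt_succ_iff] using List.mem_range.mp hk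
        simp [pvCnt, List.take_append_of_le_length hk']
      · simp only [List.map_cons, List.map_nil]
        congr 1
        simp only [pvCnt, List.take_length,
          List.take_of_length_le (by simp : (t ++ [c]).length ≤ t.length + 1),
          List.countP_append, List.countP_cons, List.countP_nil]
        split <;> simp_all
    rw [hstep, ih, hlast, hr]

-- A's indexed loop over two equal-length lists is the fold over their zip
theorem pvZipFold {σ : Type} (l1 : List Char) (l2 : List Char) (h : l1.length = l2.length)
    (f : σ → Char → Char → σ) (init : σ) (d1 d2 : Char) :
    (List.range l1.length).foldl (fun st k => f st (l1.getD k d1) (l2.getD k d2)) init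
      = (l1.zip l2).foldl (fun st p => f st p.1 p.2) init := by
  induction l1 generalizing l2 init with
  | nil => cases l2 <;> simp_all
  | cons a t1 ih =>
    cases l2 with
    | nil => simp at h
    | cons b t2 =>
      simp only [List.length_cons]
      rw [List.range_succ_eq_map, List.foldl_cons, List.foldl_map]
      simpa using ih t2 (by simpa using h) (f init a b)

-- A's fused loop body, characterised: final counters plus both dicts as folds over pvPairs
theorem pvAFold (t : List (Char × Char)) (i j : Int) (d1 d2 : PySem.Dict Int Int) :
    t.foldl (fun (st : Int × Int × PySem.Dict Int Int × PySem.Dict Int Int) p =>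
        if p.1 = '-' ∧ p.2 ≠ '-' then (st.1, st.2.1 + 1, st.2.2.1, st.2.2.2)
        else if p.2 = '-' ∧ p.1 ≠ '-' then (st.1 + 1, st.2.1, st.2.2.1, st.2.2.2)
        else if p.1 ≠ '-' ∧ p.2 ≠ '-' then
          (st.1 + 1, st.2.1 + 1, st.2.2.1.insert st.1 st.2.1, st.2.2.2.insert st.2.1 st.1)
        else st) (i, j, d1, d2)
      = (i + (t.countP (fun p => p.1 != '-') : Int), j + (t.countP (fun p => p.2 != '-') : Int),
         (pvPairs t i j).foldl (fun d p => d.insert p.1 p.2) d1,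
         (pvPairs t i j).foldl (fun d p => d.insert p.2 p.1) d2) := by
  induction t generalizing i j d1 d2 with
  | nil => simp [pvPairs]
  | cons p t ih =>
    rw [List.foldl_cons]
    by_cases h1 : p.1 = '-' <;> by_cases h2 : p.2 = '-' <;>
      simp only [h1, h2, if_pos, if_neg, ne_eq, not_true_eq_false, not_false_eq_true,
        and_true, and_false] <;>
      rw [ih] <;>
      simp [pvPairs, pvDelta, h1, h2] <;>
      omega

-- B's table-lookup comprehension equals pvPairs
theorem pvBPairs (l1 : List Char) (l2 : List Char) (h : l1.length = l2.length) (i j : Int) :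
    (List.range l1.length).filterMap (fun k =>
        if l1.getD k ' ' ≠ '-' ∧ l2.getD k ' ' ≠ '-' then
          some (i + pvCnt l1 k, j + pvCnt l2 k)
        else none)
      = pvPairs (l1.zip l2) i j := by
  induction l1 generalizing l2 i j with
  | nil => cases l2 <;> simp_all [pvPairs]
  | cons a t1 ih =>
    cases l2 with
    | nil => simp at h
    | cons b t2 =>
      simp only [List.length_cons]
      rw [List.range_succ_eq_map, List.filterMap_cons, List.filterMap_map]
      have hfun : ((fun k => if (a :: t1).getD k ' ' ≠ '-' ∧ (b :: t2).getD k ' ' ≠ '-' then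
            some (i + pvCnt (a :: t1) k, j + pvCnt (b :: t2) k) else none) ∘ Nat.succ)
          = (fun k => if t1.getD k ' ' ≠ '-' ∧ t2.getD k ' ' ≠ '-' then
            some ((i + pvDelta a) + pvCnt t1 k, (j + pvDelta b) + pvCnt t2 k) else none) := by
        funext k
        simp [Function.comp, pvCnt_cons_succ, add_assoc]
      rw [hfun, ih t2 (by simpa using h)]
      by_cases hab : a ≠ '-' ∧ b ≠ '-'
      · simp [pvPairs, hab, pvCnt_zero, pvDelta]
      · simp [pvPairs, hab]

-- ===== VERDICT (by name: the statement is the Claim_ definition above) =====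
theorem get_aln_mapping_spec : Claim_equal_get_aln_mapping := by
  intro s1 s2 _hdom
  unfold Spec_get_aln_mapping get_aln_mapping get_aln_mapping_alt
  by_cases hlen : PySem.Str.len s1 = PySem.Str.len s2
  · rw [if_neg (by simpa using hlen), if_neg (by simpa using hlen)]
    have hl : s1.toList.length = s2.toList.length := by
      have h' := hlen
      simp only [PySem.Str.len_eq] at h'
      exact_mod_cast h'
    simp only [PySem.Str.len_eq, PySem.List.pyRange_zero_natCast, List.foldl_map,
      List.filterMap_map, Function.comp, PySem.List.pyGetD_natCast]
    have hA := (pvZipFold s1.toList s2.toList hl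
        (fun (st : Int × Int × PySem.Dict Int Int × PySem.Dict Int Int) c1 c2 =>
          if c1 = '-' ∧ c2 ≠ '-' then (st.1, st.2.1 + 1, st.2.2.1, st.2.2.2)
          else if c2 = '-' ∧ c1 ≠ '-' then (st.1 + 1, st.2.1, st.2.2.1, st.2.2.2)
          else if c1 ≠ '-' ∧ c2 ≠ '-' then
            (st.1 + 1, st.2.1 + 1, st.2.2.1.insert st.1 st.2.1, st.2.2.2.insert st.2.1 st.1)
          else st)
        (0, 0, PySem.Dict.empty, PySem.Dict.empty) ' ' ' ').trans
      (pvAFold (s1.toList.zip s2.toList) 0 0 PySem.Dict.empty PySem.Dict.empty)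
    rw [hA]
    have hpairs : (List.range s1.toList.length).filterMap (fun k =>
        if s1.toList.getD k ' ' ≠ '-' ∧ s2.toList.getD k ' ' ≠ '-' then
          some ((pvPrefixCounts s1.toList).getD k 0, (pvPrefixCounts s2.toList).getD k 0)
        else none) = pvPairs (s1.toList.zip s2.toList) 0 0 := by
      rw [← pvBPairs s1.toList s2.toList hl 0 0]
      apply List.filterMap_congr
      intro k hk
      have hk1 : k < s1.toList.length + 1 := Nat.lt_succ_of_lt (List.mem_range.mp hk)
      have hk2 : k < s2.toList.length + 1 := by omega
      rw [pvPrefixCounts_eq, pvPrefixCounts_eq,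
        PySem.List.getD_map_range _ _ _ _ hk1, PySem.List.getD_map_range _ _ _ _ hk2]
      simp
    rw [hpairs]
  · rw [if_pos (by simpa using hlen), if_pos (by simpa using hlen)]
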